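-- pv_equiv track=rewrite | github.com/Ashish03M/release-notes-tracker | src/release_notes_agent/categorizer.py | label_guess
-- ===== SOURCE A (Python) =====
-- def label_guess(labels: list[str]) -> str | None:
--     """Guess category from GitHub labels (e.g., 'bug' → Fixes)."""
--     low = {l.lower() for l in labels}
--     pairs = [
--         ("feature", "Features"), ("enhancement", "Features"),
--         ("bug", "Fixes"), ("fix", "Fixes"),
--         ("docs", "Docs"), ("documentation", "Docs"),
--         ("refactor", "Refactors"),
--         ("perf", "Perf"),
--         ("chore", "Chore"),
--         ("breaking", "Breaking Changes"),
--     ]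
--     for key, cat in pairs:
--         if key in low:
--             return cat
--     return None
-- ===== SOURCE B (Python) =====
-- def label_guess(labels: list[str]) -> str | None:
--     """Guess category from GitHub labels (e.g., 'bug' -> Fixes)."""
--     table = {
--         "feature": (0, "Features"), "enhancement": (1, "Features"),
--         "bug": (2, "Fixes"), "fix": (3, "Fixes"),
--         "docs": (4, "Docs"), "documentation": (5, "Docs"),
--         "refactor": (6, "Refactors"),
--         "perf": (7, "Perf"),
--         "chore": (8, "Chore"),
--         "breaking": (9, "Breaking Changes"),
--     }
--     best = None
--     for l in labels:
--         hit = table.get(l.lower())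
--         if hit is not None and (best is None or hit[0] < best[0]):
--             best = hit
--     return None if best is None else best[1]
-- ===== Notes on version B (the rewrite author's own statement) =====
-- stated objective: alternative
-- what changed: A builds a set of lowercased labels and early-returns while scanning the fixed priority list; B builds a rank table once and makes a single pass over the labels keeping the minimum-rank match, returning its category.
import Mathlib
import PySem

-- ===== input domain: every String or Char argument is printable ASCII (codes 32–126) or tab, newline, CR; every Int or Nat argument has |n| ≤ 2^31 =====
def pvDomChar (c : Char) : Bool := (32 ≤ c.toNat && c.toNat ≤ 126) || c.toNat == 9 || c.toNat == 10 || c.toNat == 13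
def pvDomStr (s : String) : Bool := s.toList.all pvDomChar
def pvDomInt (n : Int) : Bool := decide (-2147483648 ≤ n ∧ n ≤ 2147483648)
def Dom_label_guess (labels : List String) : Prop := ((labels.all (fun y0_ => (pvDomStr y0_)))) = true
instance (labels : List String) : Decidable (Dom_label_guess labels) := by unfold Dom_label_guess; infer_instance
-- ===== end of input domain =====

-- B replaces A's early-return scan of the fixed priority list against a set of labels by a single
-- pass over the labels with a rank table, keeping the minimum-rank match (objective: alternative).

-- ===== PORT A =====
def pyPairs : List (String × String) :=
  [("feature", "Features"), ("enhancement", "Features"),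
   ("bug", "Fixes"), ("fix", "Fixes"),
   ("docs", "Docs"), ("documentation", "Docs"),
   ("refactor", "Refactors"),
   ("perf", "Perf"),
   ("chore", "Chore"),
   ("breaking", "Breaking Changes")]

-- the 'for key, cat in pairs: if key in low: return cat' loop, early return = recursion
def aScan (low : PySem.Set String) : List (String × String) → Option String
  | [] => none
  | (k, c) :: rest => if PySem.Set.contains low k then some c else aScan low rest

def label_guess (labels : List String) : Option String :=
  let low : PySem.Set String := PySem.Set.ofList (labels.map PySem.Str.lower)
  aScan low pyPairs

-- ===== PORT B =====
def altTable : PySem.Dict String (Int × String) :=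
  PySem.Dict.ofList
    [("feature", (0, "Features")), ("enhancement", (1, "Features")),
     ("bug", (2, "Fixes")), ("fix", (3, "Fixes")),
     ("docs", (4, "Docs")), ("documentation", (5, "Docs")),
     ("refactor", (6, "Refactors")),
     ("perf", (7, "Perf")),
     ("chore", (8, "Chore")),
     ("breaking", (9, "Breaking Changes"))]

def label_guess_alt (labels : List String) : Option String :=
  let best : Option (Int × String) :=
    labels.foldl
      (fun best l =>
        match altTable.get? (PySem.Str.lower l) with
        | none => best
        | some hit =>
          match best with
          | none => some hit
          | some b => if hit.1 < b.1 then some hit else best)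
      none
  match best with
  | none => none
  | some b => some b.2

-- ===== PRECONDITION & SPEC =====
def Spec_label_guess (labels : List String) (out : Option String) : Prop := out = label_guess_alt labels
instance (labels : List String) (out : Option String) : Decidable (Spec_label_guess labels out) := by unfold Spec_label_guess; infer_instance

-- ===== CLAIM (what is proved, stated in full; the proofs are below) =====
def Claim_equal_label_guess : Prop := ∀ (labels : List String), Dom_label_guess labels → Spec_label_guess labels (label_guess labels)

-- ===== LEMMAS AND PROOFS =====

-- keep-leftmost minimum-by-rank combine: a = best from earlier labels, x = best from later labels
def comb (a x : Option (Int × String)) : Option (Int × String) :=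
  match x with
  | none => a
  | some hit =>
    match a with
    | none => some hit
    | some b => if hit.1 < b.1 then some hit else a

theorem comb_none_left (x : Option (Int × String)) : comb none x = x := by
  cases x <;> rfl

theorem comb_assoc (a b c : Option (Int × String)) :
    comb (comb a b) c = comb a (comb b c) := by
  rcases b with _ | b
  · rcases c with _ | c <;> rfl
  rcases a with _ | a
  · rcases c with _ | c
    · rfl
    · by_cases h : c.1 < b.1 <;> simp [comb, h]
  rcases c with _ | c
  · rfl
  by_cases h1 : b.1 < a.1 <;> by_cases h2 : c.1 < b.1 <;>
    simp [comb, h1, h2] <;> first | rfl | omega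

-- B's loop body, and the fold from the empty accumulator
def bStep (best : Option (Int × String)) (l : String) : Option (Int × String) :=
  match altTable.get? (PySem.Str.lower l) with
  | none => best
  | some hit =>
    match best with
    | none => some hit
    | some b => if hit.1 < b.1 then some hit else best

theorem bStep_eq_comb (best : Option (Int × String)) (l : String) :
    bStep best l = comb best (altTable.get? (PySem.Str.lower l)) := by
  unfold bStep comb
  cases altTable.get? (PySem.Str.lower l) <;> cases best <;> rfl

theorem foldl_bStep_comb (ls : List String) (a : Option (Int × String)) :
    ls.foldl bStep a = comb a (ls.foldl bStep none) := by
  induction ls generalizing a with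
  | nil => simp [List.foldl, comb]
  | cons l ls ih =>
    simp only [List.foldl]
    rw [ih (bStep a l), ih (bStep none l), bStep_eq_comb, bStep_eq_comb,
        comb_none_left, comb_assoc]

-- the selection table: first set bit in priority order, with its rank
def tsel (b0 b1 b2 b3 b4 b5 b6 b7 b8 b9 : Bool) : Option (Int × String) :=
  if b0 then some (0, "Features") else if b1 then some (1, "Features")
  else if b2 then some (2, "Fixes") else if b3 then some (3, "Fixes")
  else if b4 then some (4, "Docs") else if b5 then some (5, "Docs")
  else if b6 then some (6, "Refactors") else if b7 then some (7, "Perf")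
  else if b8 then some (8, "Chore") else if b9 then some (9, "Breaking Changes")
  else none

theorem comb_get_tsel (s : String) (b0 b1 b2 b3 b4 b5 b6 b7 b8 b9 : Bool) :
    comb (altTable.get? s) (tsel b0 b1 b2 b3 b4 b5 b6 b7 b8 b9) =
      tsel ((s == "feature") || b0) ((s == "enhancement") || b1)
           ((s == "bug") || b2) ((s == "fix") || b3)
           ((s == "docs") || b4) ((s == "documentation") || b5)
           ((s == "refactor") || b6) ((s == "perf") || b7)
           ((s == "chore") || b8) ((s == "breaking") || b9) := by
  by_cases h0 : s = "feature"
  · subst h0; revert b0 b1 b2 b3 b4 b5 b6 b7 b8 b9; decide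
  by_cases h1 : s = "enhancement"
  · subst h1; revert b0 b1 b2 b3 b4 b5 b6 b7 b8 b9; decide
  by_cases h2 : s = "bug"
  · subst h2; revert b0 b1 b2 b3 b4 b5 b6 b7 b8 b9; decide
  by_cases h3 : s = "fix"
  · subst h3; revert b0 b1 b2 b3 b4 b5 b6 b7 b8 b9; decide
  by_cases h4 : s = "docs"
  · subst h4; revert b0 b1 b2 b3 b4 b5 b6 b7 b8 b9; decide
  by_cases h5 : s = "documentation"
  · subst h5; revert b0 b1 b2 b3 b4 b5 b6 b7 b8 b9; decide
  by_cases h6 : s = "refactor"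
  · subst h6; revert b0 b1 b2 b3 b4 b5 b6 b7 b8 b9; decide
  by_cases h7 : s = "perf"
  · subst h7; revert b0 b1 b2 b3 b4 b5 b6 b7 b8 b9; decide
  by_cases h8 : s = "chore"
  · subst h8; revert b0 b1 b2 b3 b4 b5 b6 b7 b8 b9; decide
  by_cases h9 : s = "breaking"
  · subst h9; revert b0 b1 b2 b3 b4 b5 b6 b7 b8 b9; decide
  · have hk : altTable.get? s = none := by
      rw [PySem.Dict.get?_eq_none_iff_not_mem_keys]
      intro hmem
      have : altTable.keys = ["feature", "enhancement", "bug", "fix", "docs",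
        "documentation", "refactor", "perf", "chore", "breaking"] := by decide
      rw [this] at hmem
      simp only [List.mem_cons, List.not_mem_nil, or_false] at hmem
      tauto
    rw [hk, comb_none_left]
    simp [beq_eq_false_iff_ne.mpr h0, beq_eq_false_iff_ne.mpr h1,
      beq_eq_false_iff_ne.mpr h2, beq_eq_false_iff_ne.mpr h3,
      beq_eq_false_iff_ne.mpr h4, beq_eq_false_iff_ne.mpr h5,
      beq_eq_false_iff_ne.mpr h6, beq_eq_false_iff_ne.mpr h7,
      beq_eq_false_iff_ne.mpr h8, beq_eq_false_iff_ne.mpr h9]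

-- B's fold computes the selection table over the lowered labels
theorem fold_eq_tsel (labels : List String) :
    labels.foldl bStep none =
      tsel ((labels.map PySem.Str.lower).contains "feature")
           ((labels.map PySem.Str.lower).contains "enhancement")
           ((labels.map PySem.Str.lower).contains "bug")
           ((labels.map PySem.Str.lower).contains "fix")
           ((labels.map PySem.Str.lower).contains "docs")
           ((labels.map PySem.Str.lower).contains "documentation")
           ((labels.map PySem.Str.lower).contains "refactor")
           ((labels.map PySem.Str.lower).contains "perf")
           ((labels.map PySem.Str.lower).contains "chore")
           ((labels.map PySem.Str.lower).contains "breaking") := by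
  induction labels with
  | nil => rfl
  | cons l ls ih =>
    simp only [List.foldl]
    rw [foldl_bStep_comb, ih, bStep_eq_comb, comb_none_left, comb_get_tsel]
    simp [eq_comm]
    have hsw : ∀ k : String, (PySem.Str.lower l == k) = decide (k = PySem.Str.lower l) := by
      intro k; by_cases h : PySem.Str.lower l = k
      · subst h; simp
      · rw [beq_eq_false_iff_ne.mpr h, decide_eq_false (fun e => h e.symm)]
    simp only [hsw]

-- A's scan of the fixed priority list is the selection table on the set's membership bits
theorem aScan_pyPairs (low : PySem.Set String) :
    aScan low pyPairs =
      Option.map Prod.snd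
        (tsel (PySem.Set.contains low "feature") (PySem.Set.contains low "enhancement")
              (PySem.Set.contains low "bug") (PySem.Set.contains low "fix")
              (PySem.Set.contains low "docs") (PySem.Set.contains low "documentation")
              (PySem.Set.contains low "refactor") (PySem.Set.contains low "perf")
              (PySem.Set.contains low "chore") (PySem.Set.contains low "breaking")) := by
  simp only [pyPairs, aScan]
  generalize PySem.Set.contains low "feature" = b0
  generalize PySem.Set.contains low "enhancement" = b1
  generalize PySem.Set.contains low "bug" = b2
  generalize PySem.Set.contains low "fix" = b3
  generalize PySem.Set.contains low "docs" = b4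
  generalize PySem.Set.contains low "documentation" = b5
  generalize PySem.Set.contains low "refactor" = b6
  generalize PySem.Set.contains low "perf" = b7
  generalize PySem.Set.contains low "chore" = b8
  generalize PySem.Set.contains low "breaking" = b9
  revert b0 b1 b2 b3 b4 b5 b6 b7 b8 b9
  decide

theorem set_contains_map (labels : List String) (k : String) :
    PySem.Set.contains (PySem.Set.ofList (labels.map PySem.Str.lower)) k =
      (labels.map PySem.Str.lower).contains k := by
  rw [PySem.Set.contains_eq_listContains]
  by_cases h : k ∈ labels.map PySem.Str.lower
  · simp [h, PySem.Set.mem_ofList]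
  · simp [h, PySem.Set.mem_ofList]

-- ===== VERDICT (by name: the statement is the Claim_ definition above) =====
theorem label_guess_spec : Claim_equal_label_guess := by
  intro labels _
  unfold Spec_label_guess label_guess label_guess_alt
  rw [show (fun (best : Option (Int × String)) (l : String) =>
        match altTable.get? (PySem.Str.lower l) with
        | none => best
        | some hit =>
          match best with
          | none => some hit
          | some b => if hit.1 < b.1 then some hit else best) = bStep from rfl]
  rw [fold_eq_tsel, aScan_pyPairs,
      set_contains_map, set_contains_map, set_contains_map, set_contains_map,
      set_contains_map, set_contains_map, set_contains_map, set_contains_map,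
      set_contains_map, set_contains_map]
  cases tsel ((labels.map PySem.Str.lower).contains "feature")
      ((labels.map PySem.Str.lower).contains "enhancement")
      ((labels.map PySem.Str.lower).contains "bug")
      ((labels.map PySem.Str.lower).contains "fix")
      ((labels.map PySem.Str.lower).contains "docs")
      ((labels.map PySem.Str.lower).contains "documentation")
      ((labels.map PySem.Str.lower).contains "refactor")
      ((labels.map PySem.Str.lower).contains "perf")
      ((labels.map PySem.Str.lower).contains "chore")
      ((labels.map PySem.Str.lower).contains "breaking") <;> rfl
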